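-- pv_equiv track=rewrite | github.com/VadimZud/pmxsible | plugins/modules/ansible_collection.py | fix_orphaned_version_specifiers
-- ===== SOURCE A (Python) =====
-- VERSION_SPECIFIER_PREFIXES = ('*', '!=', '==', '>=', '>', '<=', '<')
--
-- def fix_orphaned_version_specifiers(name):
--     '''Join orphaned version specifiers with collection name.
--
--     If user defines `name` option as string, ansible will split name to list
--     with `,` delimiter. So collection name with multiple version specifiers
--     (`name: community.postgresql:>2.2.1,<2.4.1,!=2.3.5` for example)
--     turns into list with orphaned version specifiers
--     (`['community.postgresql:>2.2.1', '<2.4.1', '!=2.3.5']`).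
--     This function fix this problem.
--     '''
--
--     fixed_name = []
--     collection_name_components = []
--     for item in name:
--         if item.lstrip().startswith(VERSION_SPECIFIER_PREFIXES):
--             collection_name_components.append(item)
--         else:
--             if collection_name_components:
--                 fixed_name.append(','.join(collection_name_components))
--             collection_name_components = [item]
--     if collection_name_components:
--         fixed_name.append(','.join(collection_name_components))
--
--     return fixed_name
-- ===== SOURCE B (Python) =====
-- VERSION_SPECIFIER_PREFIXES = ('*', '!=', '==', '>=', '>', '<=', '<')
--
-- def fix_orphaned_version_specifiers(name):
--     '''Join orphaned version specifiers with collection name.'''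
--     fixed_name = []
--     for item in name:
--         if item.lstrip().startswith(VERSION_SPECIFIER_PREFIXES) and fixed_name:
--             fixed_name[-1] += ',' + item
--         else:
--             fixed_name.append(item)
--     return fixed_name
-- ===== Notes on version B (the rewrite author's own statement) =====
-- stated objective: simpler
-- what changed: B builds the output in a single pass with no intermediate components buffer: a version specifier is appended with ',' onto the last finished output element in place, so the separate pending-group list, the inner flush and the trailing flush all disappear.
import Mathlib
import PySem

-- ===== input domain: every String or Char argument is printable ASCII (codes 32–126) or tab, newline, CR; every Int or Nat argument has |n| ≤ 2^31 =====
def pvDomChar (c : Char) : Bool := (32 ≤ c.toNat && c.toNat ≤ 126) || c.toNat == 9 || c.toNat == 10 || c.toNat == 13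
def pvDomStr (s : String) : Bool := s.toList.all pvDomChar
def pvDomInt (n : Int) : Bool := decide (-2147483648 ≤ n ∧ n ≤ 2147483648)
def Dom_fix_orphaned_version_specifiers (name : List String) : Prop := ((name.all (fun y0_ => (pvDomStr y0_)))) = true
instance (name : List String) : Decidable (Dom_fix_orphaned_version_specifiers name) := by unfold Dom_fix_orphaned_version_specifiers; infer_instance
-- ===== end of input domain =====

-- ===== PORT A =====
-- B is a simpler one-pass rewrite that joins specifiers onto the last finished element,
-- removing A's pending-components buffer and its two flushes.
def pvSpecPrefixes : List String := ["*", "!=", "==", ">=", ">", "<=", "<"]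

-- item.lstrip().startswith(VERSION_SPECIFIER_PREFIXES)
def pvIsSpec (item : String) : Bool :=
  pvSpecPrefixes.any (fun p => PySem.Str.startswith (PySem.Str.lstrip item) p)

def fix_orphaned_version_specifiers (name : List String) : List String :=
  let st := name.foldl
    (fun (st : List String × List String) item =>
      if pvIsSpec item then
        (st.1, st.2 ++ [item])
      else
        ((if st.2.isEmpty then st.1 else st.1 ++ [PySem.Str.join "," st.2]), [item]))
    ([], [])
  if st.2.isEmpty then st.1 else st.1 ++ [PySem.Str.join "," st.2]

-- ===== PORT B =====
-- fixed_name[-1] += ',' + item  (string concatenation, done at the code-point level)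
def pvStrCat (a b : String) : String := String.ofList (a.toList ++ b.toList)

def fix_orphaned_version_specifiers_alt (name : List String) : List String :=
  name.foldl
    (fun (out : List String) item =>
      if pvIsSpec item && !out.isEmpty then
        out.dropLast ++ [pvStrCat (pvStrCat (out.getLast!) ",") item]
      else
        out ++ [item])
    []

-- ===== PRECONDITION & SPEC =====
def Spec_fix_orphaned_version_specifiers (name : List String) (out : List String) : Prop := out = fix_orphaned_version_specifiers_alt name
instance (name : List String) (out : List String) : Decidable (Spec_fix_orphaned_version_specifiers name out) := by unfold Spec_fix_orphaned_version_specifiers; infer_instance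

-- ===== CLAIM (what is proved, stated in full; the proofs are below) =====
def Claim_equal_fix_orphaned_version_specifiers : Prop := ∀ (name : List String), Dom_fix_orphaned_version_specifiers name → Spec_fix_orphaned_version_specifiers name (fix_orphaned_version_specifiers name)

-- ===== LEMMAS AND PROOFS =====

-- join "," (cs ++ [c]) = (join "," cs) + "," + c  at the List Char level, for cs ≠ []
lemma pvCharsJoinSnoc (cs : List (List Char)) (c : List Char) (h : cs ≠ []) :
    PySem.Chars.join [','] (cs ++ [c]) = PySem.Chars.join [','] cs ++ [','] ++ c := by
  induction cs with
  | nil => exact absurd rfl h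
  | cons a t ih =>
    cases t with
    | nil => simp [PySem.Chars.join_cons_cons, PySem.Chars.join_singleton]
    | cons b u =>
      have := ih (by simp)
      simp only [List.cons_append, PySem.Chars.join_cons_cons] at this ⊢
      simp [this]

lemma pvJoinSnoc (cs : List String) (c : String) (h : cs ≠ []) :
    PySem.Str.join "," (cs ++ [c]) = pvStrCat (pvStrCat (PySem.Str.join "," cs) ",") c := by
  apply String.toList_injective
  simp [pvStrCat, PySem.Str.toList_join, String.toList_ofList,
    pvCharsJoinSnoc (cs.map String.toList) c.toList (by simpa using h)]

lemma pvJoinSingleton (c : String) : PySem.Str.join "," [c] = c := by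
  apply String.toList_injective
  simp [PySem.Str.toList_join, PySem.Chars.join_singleton]

-- the step functions
lemma pvMain (l : List String) (fixed comps : List String) (h : comps ≠ []) :
    (let st := l.foldl
        (fun (st : List String × List String) item =>
          if pvIsSpec item then (st.1, st.2 ++ [item])
          else ((if st.2.isEmpty then st.1 else st.1 ++ [PySem.Str.join "," st.2]), [item]))
        (fixed, comps)
      if st.2.isEmpty then st.1 else st.1 ++ [PySem.Str.join "," st.2]) =
    l.foldl
      (fun (out : List String) item =>
        if pvIsSpec item && !out.isEmpty then
          out.dropLast ++ [pvStrCat (pvStrCat (out.getLast!) ",") item]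
        else out ++ [item])
      (fixed ++ [PySem.Str.join "," comps]) := by
  induction l generalizing fixed comps with
  | nil => simp [h]
  | cons i t ih =>
    by_cases hs : pvIsSpec i = true
    · simp only [List.foldl_cons, hs, if_pos, Bool.true_and, List.isEmpty_eq_false_iff,
        List.append_ne_nil_of_right_ne_nil fixed (by simp : [PySem.Str.join "," comps] ≠ []),
        not_false_eq_true, Bool.not_eq_eq_eq_not]
      have h2 : comps ++ [i] ≠ [] := by simp
      rw [ih (fixed := fixed) (comps := comps ++ [i]) h2]
      have hd : (fixed ++ [PySem.Str.join "," comps]).dropLast = fixed := by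
        simp [List.dropLast_concat]
      have hg : (fixed ++ [PySem.Str.join "," comps]).getLast! = PySem.Str.join "," comps := by
        rw [List.getLast!_eq_getLast?_getD]; simp
      simp only [List.isEmpty_eq_false_iff, hd, hg]
      rw [pvJoinSnoc comps i h]
      simp
    · simp only [List.foldl_cons, hs, if_neg, Bool.false_and, Bool.false_eq_true,
        not_false_eq_true]
      have he : comps.isEmpty = false := by simpa using h
      rw [he]
      simp only [Bool.false_eq_true, if_false]
      have := ih (fixed := fixed ++ [PySem.Str.join "," comps]) (comps := [i]) (by simp)
      rw [this, pvJoinSingleton]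

-- ===== VERDICT (by name: the statement is the Claim_ definition above) =====
theorem fix_orphaned_version_specifiers_spec : Claim_equal_fix_orphaned_version_specifiers := by
  intro name _
  unfold Spec_fix_orphaned_version_specifiers
  cases name with
  | nil => rfl
  | cons i t =>
    unfold fix_orphaned_version_specifiers fix_orphaned_version_specifiers_alt
    simp only [List.foldl_cons]
    by_cases hs : pvIsSpec i = true
    · simp only [hs, if_pos, List.isEmpty_nil, Bool.not_true, Bool.and_false,
        Bool.false_eq_true, if_false, List.nil_append]
      have := pvMain t [] [i] (by simp)
      rw [pvJoinSingleton] at this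
      simpa using this
    · simp only [hs, Bool.false_and, Bool.false_eq_true, if_false, List.isEmpty_nil, if_pos,
        List.nil_append]
      have := pvMain t [] [i] (by simp)
      rw [pvJoinSingleton] at this
      simpa using this
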